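-- pv_equiv track=rewrite | github.com/usuny0317/programmers-test | day10/day10-4.py | solution
-- ===== SOURCE A (Python) =====
-- def solution(my_string, m, c):
--     answer = ''
--     colum = len(my_string) // m
--     row = m
--     array2 = [[0 for _ in range(row)] for _ in range(colum)]
--
--     b = []
--     for i in range(0, len(my_string), 1):
--         b.append(my_string[i:i + 1])
--
--     for k in range(0, colum, 1):
--         for j in range(0, row, 1):
--             array2[k][j] = b[0]
--             b.remove(b[0])
--
--     for k in range(0, colum, 1):
--         answer = answer + array2[k][c - 1]
--     return answer
-- ===== SOURCE B (Python) =====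
-- def solution(my_string, m, c):
--     n = len(my_string) // m
--     return ''.join(my_string[k * m + c - 1] for k in range(n))
-- ===== Notes on version B (the rewrite author's own statement) =====
-- stated objective: faster
-- what changed: B drops A's 2D grid and front-removal pop-queue (quadratic) and joins the stride characters my_string[k*m + c - 1] directly over k in range(len(my_string)//m).
-- outside the precondition, e.g. on solution('abcd', 2, 0): A returns 'bd', B returns 'db'
import Mathlib
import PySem

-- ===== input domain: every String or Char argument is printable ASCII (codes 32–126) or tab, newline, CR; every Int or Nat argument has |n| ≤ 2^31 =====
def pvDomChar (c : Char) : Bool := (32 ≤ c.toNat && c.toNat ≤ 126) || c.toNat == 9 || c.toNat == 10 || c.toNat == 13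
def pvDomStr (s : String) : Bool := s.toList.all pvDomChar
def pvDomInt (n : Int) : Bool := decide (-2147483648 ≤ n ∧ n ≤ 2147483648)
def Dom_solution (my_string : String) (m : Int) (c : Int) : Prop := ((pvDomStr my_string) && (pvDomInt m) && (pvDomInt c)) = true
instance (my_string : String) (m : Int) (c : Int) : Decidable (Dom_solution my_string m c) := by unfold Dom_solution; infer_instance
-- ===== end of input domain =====

-- B drops A's 2D grid and destructive pop-queue and joins the stride characters directly (simpler).


-- ===== PORT A =====
-- Port of A over List Char; each Python 1-char string cell is a List Char.  The grid's int-0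
-- initial cells are represented by [] (never read: every cell is overwritten before the read
-- loop, and under Pre_ every pyGetD/remove?-getD default is unreachable).
def solution (my_string : String) (m : Int) (c : Int) : String :=
  let s := my_string.toList
  let colum := PySem.Int.floordiv (s.length : Int) m
  let row := m
  let array2 : List (List (List Char)) :=
    (PySem.List.pyRange 0 colum 1).map (fun _ =>
      (PySem.List.pyRange 0 row 1).map (fun _ => ([] : List Char)))
  let b : List (List Char) :=
    (PySem.List.pyRange 0 (s.length : Int) 1).foldl
      (fun acc i => acc ++ [PySem.List.slice s (some i) (some (i + 1))]) []
  let st :=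
    (PySem.List.pyRange 0 colum 1).foldl (fun st k =>
      (PySem.List.pyRange 0 row 1).foldl (fun st j =>
        (PySem.List.pySetD st.1 k
           (PySem.List.pySetD (PySem.List.pyGetD st.1 k []) j (PySem.List.pyGetD st.2 0 [])),
         (PySem.List.remove? st.2 (PySem.List.pyGetD st.2 0 [])).getD st.2)) st)
      (array2, b)
  let answer : List Char :=
    (PySem.List.pyRange 0 colum 1).foldl
      (fun ans k => ans ++ PySem.List.pyGetD (PySem.List.pyGetD st.1 k []) (c - 1) []) []
  String.ofList answer

-- ===== PORT B =====
def solution_alt (my_string : String) (m : Int) (c : Int) : String :=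
  let s := my_string.toList
  let n := PySem.Int.floordiv (s.length : Int) m
  String.ofList ((PySem.List.pyRange 0 n 1).map (fun k => PySem.List.pyGetD s (k * m + c - 1) ' '))

-- ===== PRECONDITION & SPEC =====
-- Pre_ excludes m = 0 (A raises ZeroDivisionError) and, when len(my_string)//m > 0, c outside
-- 1..m: there A either raises IndexError (c-1 ≥ m or c-1 < -m) or, for 1-m ≤ c ≤ 0, returns via
-- an accidental negative-index wraparound inside a grid row, a corner value no caller would
-- specify (B wraps in the whole string instead).
def Pre_solution (my_string : String) (m : Int) (c : Int) : Prop :=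
  m ≠ 0 ∧ (PySem.Int.floordiv (my_string.toList.length : Int) m ≤ 0 ∨ (1 ≤ c ∧ c ≤ m))
instance (my_string : String) (m : Int) (c : Int) : Decidable (Pre_solution my_string m c) := by
  unfold Pre_solution; infer_instance
def pvWitness_solution : String × Int × Int := ("abcdef", 2, 1)

def Spec_solution (my_string : String) (m : Int) (c : Int) (out : String) : Prop := out = solution_alt my_string m c
instance (my_string : String) (m : Int) (c : Int) (out : String) : Decidable (Spec_solution my_string m c out) := by unfold Spec_solution; infer_instance

-- ===== CLAIM (what is proved, stated in full; the proofs are below) =====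
def Claim_equal_solution : Prop := ∀ (my_string : String) (m : Int) (c : Int), Dom_solution my_string m c → Pre_solution my_string m c → Spec_solution my_string m c (solution my_string m c)

-- ===== LEMMAS AND PROOFS =====

-- Setting index k back to the value already there leaves the list unchanged.
lemma set_getElem?_self {α : Type} (l : List α) (k : Nat) (x : α) (h : l[k]? = some x) :
    l.set k x = l := by
  obtain ⟨hk, he⟩ := List.getElem?_eq_some_iff.mp h
  apply List.ext_getElem (by simp)
  intro i h1 h2
  rw [List.getElem_set]
  split
  · next heq => subst heq; exact he.symm
  · rfl

-- A's first loop builds the list of 1-character slices of s.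
lemma bList_eq (s : List Char) :
    (PySem.List.pyRange 0 (s.length : Int) 1).foldl
      (fun acc i => acc ++ [PySem.List.slice s (some i) (some (i + 1))]) []
    = s.map (fun ch => [ch]) := by
  rw [PySem.List.foldl_append_singleton_eq_map, List.nil_append,
      PySem.List.pyRange_zero_natCast, List.map_map]
  apply List.ext_getElem (by simp)
  intro i h1 h2
  simp only [List.getElem_map, List.getElem_range, Function.comp]
  have : ((i : Int) + 1) = ((i : Int) + ((1 : Nat) : Int)) := by norm_num
  rw [this, PySem.List.slice_natCast_add s i 1]
  simp at h2
  rw [List.take_one_drop_eq_of_lt_length h2]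
  simp

-- A's inner fill loop: row k of arr (currently row0) gets the first j queue elements written
-- into its first j cells; the queue loses its first j elements.
lemma inner_fill (k : Nat) (row0 : List (List Char)) :
    ∀ (j : Nat) (arr : List (List (List Char))) (bq : List (List Char)),
    arr[k]? = some row0 → j ≤ bq.length → j ≤ row0.length →
    (List.range j).foldl (fun st (jj : Nat) =>
        (PySem.List.pySetD st.1 (k : Int)
           (PySem.List.pySetD (PySem.List.pyGetD st.1 (k : Int) []) (jj : Int)
             (PySem.List.pyGetD st.2 0 [])),
         (PySem.List.remove? st.2 (PySem.List.pyGetD st.2 0 [])).getD st.2)) (arr, bq)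
    = (arr.set k (bq.take j ++ row0.drop j), bq.drop j) := by
  intro j
  induction j with
  | zero =>
    intro arr bq h _ _
    simp [set_getElem?_self arr k row0 h]
  | succ j ih =>
    intro arr bq h hb hr
    obtain ⟨hk, hke⟩ := List.getElem?_eq_some_iff.mp h
    rw [List.range_succ, List.foldl_append, ih arr bq h (by omega) (by omega)]
    simp only [List.foldl_cons, List.foldl_nil]
    have hjb : j < bq.length := by omega
    have hjr : j < row0.length := by omega
    have hdrop : bq.drop j = bq[j] :: bq.drop (j + 1) := List.drop_eq_getElem_cons hjb
    have hget2 : PySem.List.pyGetD (bq.drop j) 0 [] = bq[j] := by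
      rw [hdrop, PySem.List.pyGetD_zero_cons]
    have hrem : (PySem.List.remove? (bq.drop j) bq[j]).getD (bq.drop j) = bq.drop (j + 1) := by
      rw [hdrop, PySem.List.remove?_cons_self]; rfl
    have hlen1 : k < (arr.set k (bq.take j ++ row0.drop j)).length := by simpa using hk
    have hget1 : PySem.List.pyGetD (arr.set k (bq.take j ++ row0.drop j)) (k : Int) []
        = bq.take j ++ row0.drop j := by
      rw [PySem.List.pyGetD_natCast, List.getD_eq_getElem _ _ hlen1, List.getElem_set_self hlen1]
    rw [hget1, hget2, hrem, PySem.List.pySetD_natCast, PySem.List.pySetD_natCast, List.set_set]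
    congr 1
    have htj : (bq.take j).length = j := List.length_take_of_le (by omega)
    rw [List.set_append_right j bq[j] (by omega), htj, Nat.sub_self,
        List.drop_eq_getElem_cons hjr, List.set_cons_zero, ← List.take_concat_get hjb,
        List.concat_eq_append, List.append_assoc, List.singleton_append]

-- A's outer fill loop on the all-[] grid of `cols` rows of length r, with queue b0:
-- after k rounds the first k rows hold consecutive r-chunks of b0 and k*r items are consumed.
lemma outer_fill (r : Nat) (b0 : List (List Char)) (cols : Nat) (hlen : cols * r ≤ b0.length) :
    ∀ (k : Nat), k ≤ cols →
    (List.range k).foldl (fun st (kk : Nat) =>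
        (List.range r).foldl (fun st (jj : Nat) =>
          (PySem.List.pySetD st.1 (kk : Int)
             (PySem.List.pySetD (PySem.List.pyGetD st.1 (kk : Int) []) (jj : Int)
               (PySem.List.pyGetD st.2 0 [])),
           (PySem.List.remove? st.2 (PySem.List.pyGetD st.2 0 [])).getD st.2)) st)
      (List.replicate cols (List.replicate r ([] : List Char)), b0)
    = ((List.range cols).map (fun i =>
          if i < k then (b0.drop (i * r)).take r else List.replicate r ([] : List Char)),
       b0.drop (k * r)) := by
  intro k
  induction k with
  | zero =>
    intro _
    simp only [List.range_zero, List.foldl_nil, Nat.zero_mul, List.drop_zero]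
    congr 1
    apply List.ext_getElem (by simp)
    intro i h1 h2
    simp
  | succ k ih =>
    intro hk1
    rw [List.range_succ, List.foldl_append, ih (by omega)]
    simp only [List.foldl_cons, List.foldl_nil]
    have hkc : k < cols := by omega
    have hkr : (k + 1) * r ≤ b0.length := le_trans (by exact Nat.mul_le_mul_right r (by omega)) hlen
    have hkr' : k * r + r ≤ b0.length := by rw [Nat.succ_mul] at hkr; exact hkr
    have hsome : ((List.range cols).map (fun i =>
          if i < k then (b0.drop (i * r)).take r else List.replicate r ([] : List Char)))[k]?
        = some (List.replicate r ([] : List Char)) := by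
      rw [List.getElem?_eq_some_iff]
      refine ⟨by simpa using hkc, ?_⟩
      simp
    rw [inner_fill k (List.replicate r ([] : List Char)) r _ _ hsome
        (by rw [List.length_drop]; omega) (by simp)]
    rw [List.drop_drop, List.drop_replicate]
    congr 1
    · apply List.ext_getElem (by simp)
      intro i h1 h2
      rw [List.getElem_set]
      simp only [List.getElem_map, List.getElem_range]
      have h2' : i < cols := by simpa using h2
      split
      · next heq => subst heq; simp
      · next hne =>
        by_cases hik : i < k
        · simp [hik, show i < k + 1 by omega]
        · simp [hik, show ¬ i < k + 1 by omega]
    · congr 1; ring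

-- A flatMap whose pieces are all singletons is a map.
lemma flatMap_singleton_eq_map {α β : Type} (f : α → β) :
    ∀ (l : List α) (g : α → List β), (∀ x ∈ l, g x = [f x]) → l.flatMap g = l.map f := by
  intro l
  induction l with
  | nil => intro g _; rfl
  | cons x t ih =>
    intro g h
    rw [List.flatMap_cons, List.map_cons, h x (by simp), ih g (fun y hy => h y (by simp [hy]))]
    rfl

lemma solution_eq_alt (my_string : String) (m : Int) (c : Int) (_hm0 : m ≠ 0)
    (hpc : PySem.Int.floordiv (my_string.toList.length : Int) m ≤ 0 ∨ (1 ≤ c ∧ c ≤ m)) :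
    solution my_string m c = solution_alt my_string m c := by
  by_cases hcol : PySem.Int.floordiv (my_string.toList.length : Int) m ≤ 0
  · simp only [solution, solution_alt, PySem.List.pyRange_one_eq_nil hcol, List.foldl_nil,
      List.map_nil]
  rcases hpc with h | ⟨hc1, hcm⟩
  · exact absurd h hcol
  have hm1 : 1 ≤ m := le_trans hc1 hcm
  set L := my_string.toList with hL
  set r : Nat := m.toNat with hr
  have hmr : m = (r : Int) := by omega
  have hr1 : 1 ≤ r := by omega
  set cols : Nat := L.length / r with hcols
  have hfd : PySem.Int.floordiv (L.length : Int) m = (cols : Int) := by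
    rw [hmr]; exact_mod_cast PySem.Int.floordiv_natCast L.length r
  have hcolpos : 0 < cols := by
    rw [hfd] at hcol; omega
  set cidx : Nat := (c - 1).toNat with hcidx
  have hcval : c - 1 = (cidx : Int) := by omega
  have hcr : cidx < r := by omega
  have hmul : cols * r ≤ L.length := Nat.div_mul_le_self _ _
  simp only [solution, solution_alt, hfd, ← hL, bList_eq L]
  simp only [hmr, PySem.List.pyRange_zero_natCast, List.foldl_map, List.map_map]
  simp only [Function.comp_def]
  have harr : (List.map (fun (_ : Nat) => List.map (fun (_ : Nat) => ([] : List Char)) (List.range r)) (List.range cols))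
      = List.replicate cols (List.replicate r ([] : List Char)) := by
    simp [List.map_const']
  rw [harr, outer_fill r (L.map (fun ch => [ch])) cols (by simpa using hmul) cols le_rfl,
      PySem.List.foldl_append_eq_flatMap, List.nil_append]
  apply congrArg String.ofList
  apply flatMap_singleton_eq_map
  intro k hk
  have hkcols : k < cols := by simpa using hk
  have hk1 : (k + 1) * r ≤ L.length :=
    le_trans (Nat.mul_le_mul_right r (by omega)) hmul
  have hk1' : k * r + r ≤ L.length := by rw [Nat.succ_mul] at hk1; exact hk1
  have hchunklen : ((((L.map (fun ch => [ch])).drop (k * r)).take r)).length = r := by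
    simp [List.length_take, List.length_drop]
    omega
  have houter : PySem.List.pyGetD
      (List.map (fun i => if i < cols then ((L.map (fun ch => [ch])).drop (i * r)).take r
        else List.replicate r ([] : List Char)) (List.range cols)) (k : Int) []
      = ((L.map (fun ch => [ch])).drop (k * r)).take r := by
    rw [PySem.List.pyGetD_natCast, List.getD_eq_getElem _ _ (by simpa using hkcols)]
    simp [hkcols]
  rw [houter, hcval, PySem.List.pyGetD_natCast,
      List.getD_eq_getElem _ _ (by rw [hchunklen]; exact hcr)]
  rw [List.getElem_take, List.getElem_drop, List.getElem_map]
  have hidx : (k : Int) * (r : Int) + c - 1 = ((k * r + cidx : Nat) : Int) := by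
    push_cast; omega
  rw [hidx, PySem.List.pyGetD_natCast, List.getD_eq_getElem _ _ (by omega)]

-- ===== VERDICT (by name: the statement is the Claim_ definition above) =====
theorem solution_spec : Claim_equal_solution := by
  intro my_string m c _ hpre
  obtain ⟨hm0, hpc⟩ := hpre
  simpa only [Spec_solution] using solution_eq_alt my_string m c hm0 hpc
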